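-- pv_equiv track=rewrite | github.com/solisoares/therapy-aid-tool | therapy_aid_tool/interaction_detector.py | get_3preds
-- ===== SOURCE A (Python) =====
-- from typing import List
--
-- def get_3preds(preds: List[str]):
--     """Return 3 predictions even though there
--     is less or more in each predictions file.
--
--     Args:
--         preds (List[str]): File predictions in form of a list o strings
--
--     Returns:
--         predictions: 3 predictions, each one with or without ('') content
--     """
--     # Initialize each class prediction
--     pred0, pred1, pred2 = [''], [''], ['']
--     # Get together repeated class predictions
--     for pred in preds:
--         if pred[0] == '0':
--             pred0.append(pred)  # ['0...','0...','0...', ...]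
--         if pred[0] == '1':
--             pred1.append(pred)
--         if pred[0] == '2':
--             pred2.append(pred)
--     # Choose prediction with higher conf among repeated ones
--     pred0 = get_higher_conf_pred(pred0)
--     pred1 = get_higher_conf_pred(pred1)
--     pred2 = get_higher_conf_pred(pred2)
--     return pred0, pred1, pred2
--
-- def get_higher_conf_pred(repeated_preds: List[str]):
--     """Return the prediction with higher conf among repeated ones
--
--     It sorts a list based on the last element that is divided by space
--     due to a lambda function
--
--     Args:
--         repeated_preds (List[str]): A list with repeated predictions
--
--     Returns:
--         [higher_conf_pred]: The higher conf prediction inside a list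
--     """
--     sorted_preds = sorted(
--         repeated_preds,
--         key=lambda x: x.split(" ")[-1]
--     )
--     higher_conf_pred = sorted_preds[-1]
--     return higher_conf_pred
-- ===== SOURCE B (Python) =====
-- def get_3preds(preds):
--     # One pass: keep the running highest-confidence (key, pred) per class,
--     # last-on-tie wins (matching the stable sort-and-take-last of A).
--     best0 = best1 = best2 = ('', '')
--     for pred in preds:
--         c = pred[0]
--         if c == '0':
--             k = pred.split(' ')[-1]
--             if best0[0] <= k:
--                 best0 = (k, pred)
--         elif c == '1':
--             k = pred.split(' ')[-1]
--             if best1[0] <= k: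
--                 best1 = (k, pred)
--         elif c == '2':
--             k = pred.split(' ')[-1]
--             if best2[0] <= k:
--                 best2 = (k, pred)
--     return best0[1], best1[1], best2[1]
-- ===== Notes on version B (the rewrite author's own statement) =====
-- stated objective: alternative
-- what changed: Replaces A's grouping loop plus three per-class stable sorts (taking the last element of each) with a single pass that keeps the running highest-confidence (key, pred) pair per class, later element winning ties.
-- outside the precondition, e.g. on get_3preds(['']): A raises IndexError, B raises IndexError
import Mathlib
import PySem

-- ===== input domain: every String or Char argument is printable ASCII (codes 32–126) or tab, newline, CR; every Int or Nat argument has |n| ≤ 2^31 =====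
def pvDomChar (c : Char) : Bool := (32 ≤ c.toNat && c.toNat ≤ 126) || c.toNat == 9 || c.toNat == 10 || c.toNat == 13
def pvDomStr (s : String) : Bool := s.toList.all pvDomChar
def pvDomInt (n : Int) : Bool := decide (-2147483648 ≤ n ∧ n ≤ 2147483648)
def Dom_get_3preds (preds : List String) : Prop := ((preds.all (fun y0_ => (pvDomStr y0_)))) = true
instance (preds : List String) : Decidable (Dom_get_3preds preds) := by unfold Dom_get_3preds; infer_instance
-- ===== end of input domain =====

-- B replaces A's grouping pass plus three per-class stable sorts by ONE pass keeping
-- the running highest-confidence (key, pred) pair per class (later element wins ties).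


-- ===== PORT A =====
-- key = lambda x: x.split(" ")[-1]; split(" ") never raises (sep ≠ "") and never returns [], so getD/pyGetD are exact
def pvKey (x : String) : String :=
  PySem.List.pyGetD ((PySem.Str.split? x " ").getD []) (-1) ""

def get_higher_conf_pred (repeated_preds : List String) : String :=
  let sorted_preds := PySem.List.sorted repeated_preds (fun x => pvKey x)
  PySem.List.pyGetD sorted_preds (-1) ""   -- sorted_preds[-1]; the list is nonempty at every call site (seeded with '')

-- the body of A's grouping loop (three independent ifs, appending to the matching group)
def pvAStep (acc : List String × List String × List String) (pred : String) :
    List String × List String × List String :=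
  let acc := if PySem.Str.pyGet? pred 0 == some '0' then (acc.1 ++ [pred], acc.2.1, acc.2.2) else acc
  let acc := if PySem.Str.pyGet? pred 0 == some '1' then (acc.1, acc.2.1 ++ [pred], acc.2.2) else acc
  if PySem.Str.pyGet? pred 0 == some '2' then (acc.1, acc.2.1, acc.2.2 ++ [pred]) else acc

def get_3preds (preds : List String) : List String :=
  let st := preds.foldl pvAStep ([""], [""], [""])
  [get_higher_conf_pred st.1, get_higher_conf_pred st.2.1, get_higher_conf_pred st.2.2]

-- ===== PORT B =====
-- the body of B's single loop: update the matching class's running-best (key, pred) pair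
def pvBStep (b : (String × String) × (String × String) × (String × String)) (pred : String) :
    (String × String) × (String × String) × (String × String) :=
  let c := PySem.Str.pyGet? pred 0
  if c == some '0' then
    (if b.1.1 ≤ pvKey pred then (pvKey pred, pred) else b.1, b.2.1, b.2.2)
  else if c == some '1' then
    (b.1, if b.2.1.1 ≤ pvKey pred then (pvKey pred, pred) else b.2.1, b.2.2)
  else if c == some '2' then
    (b.1, b.2.1, if b.2.2.1 ≤ pvKey pred then (pvKey pred, pred) else b.2.2)
  else b

def get_3preds_alt (preds : List String) : List String :=
  let st := preds.foldl pvBStep (("", ""), ("", ""), ("", ""))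
  [st.1.2, st.2.1.2, st.2.2.2]

-- ===== PRECONDITION & SPEC =====
-- Pre_ excludes lists containing an empty string, on which A (pred[0]) raises IndexError.
def Pre_get_3preds (preds : List String) : Prop := ∀ p ∈ preds, p ≠ ""
instance (preds : List String) : Decidable (Pre_get_3preds preds) := by unfold Pre_get_3preds; infer_instance
def pvWitness_get_3preds : List String := ["0 person 0.5", "1 toy 0.9", "0 person 0.8"]

def Spec_get_3preds (preds : List String) (out : List String) : Prop := out = get_3preds_alt preds
instance (preds : List String) (out : List String) : Decidable (Spec_get_3preds preds out) := by unfold Spec_get_3preds; infer_instance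

-- ===== CLAIM (what is proved, stated in full; the proofs are below) =====
def Claim_equal_get_3preds : Prop := ∀ (preds : List String), Dom_get_3preds preds → Pre_get_3preds preds → Spec_get_3preds preds (get_3preds preds)

-- ===== LEMMAS AND PROOFS =====

-- the per-class running-max step of B
def pvStep (b : String × String) (x : String) : String × String :=
  if b.1 ≤ pvKey x then (pvKey x, x) else b

def pvP (c : Char) : String → Bool := fun p => PySem.Str.pyGet? p 0 == some c

-- A's grouping fold splits into three filters
lemma pvA_fold_split (l : List String) (a b c : List String) :
    l.foldl pvAStep (a, b, c)
    = (a ++ l.filter (pvP '0'), b ++ l.filter (pvP '1'), c ++ l.filter (pvP '2')) := by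
  induction l generalizing a b c with
  | nil => simp
  | cons x xs ih =>
    simp only [List.foldl_cons, List.filter_cons, pvAStep, pvP]
    by_cases h0 : (PySem.Str.pyGet? x 0 == some '0') = true <;>
    by_cases h1 : (PySem.Str.pyGet? x 0 == some '1') = true <;>
    by_cases h2 : (PySem.Str.pyGet? x 0 == some '2') = true <;>
    simp only [h0, h1, h2, if_true, if_false, Bool.false_eq_true, ih,
      List.append_assoc, List.cons_append] <;> rfl

-- B's step written as three independent conditional updates (the elif chain resolved
-- via the mutual exclusivity of the first-character tests)
lemma pvBStep_eq (b : (String × String) × (String × String) × (String × String)) (x : String) :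
    pvBStep b x = ((if pvP '0' x then pvStep b.1 x else b.1),
                   (if pvP '1' x then pvStep b.2.1 x else b.2.1),
                   (if pvP '2' x then pvStep b.2.2 x else b.2.2)) := by
  unfold pvBStep pvStep pvP
  by_cases h0 : PySem.Str.pyGet? x 0 = some '0' <;>
  by_cases h1 : PySem.Str.pyGet? x 0 = some '1' <;>
  by_cases h2 : PySem.Str.pyGet? x 0 = some '2' <;>
  simp_all

-- B's one-pass fold splits into three filtered running-max folds
lemma pvB_fold_split (l : List String) (b0 b1 b2 : String × String) :
    l.foldl pvBStep (b0, b1, b2)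
    = ((l.filter (pvP '0')).foldl pvStep b0,
       (l.filter (pvP '1')).foldl pvStep b1,
       (l.filter (pvP '2')).foldl pvStep b2) := by
  induction l generalizing b0 b1 b2 with
  | nil => simp
  | cons x xs ih =>
    have comp : ∀ (p : String → Bool) (b : String × String),
        List.foldl pvStep (if p x then pvStep b x else b) (xs.filter p) =
        List.foldl pvStep b ((x :: xs).filter p) := by
      intro p b
      rw [List.filter_cons]
      by_cases h : p x <;> simp [h]
    rw [List.foldl_cons, pvBStep_eq, ih]
    simp only [Prod.mk.injEq]
    exact ⟨comp _ b0, comp _ b1, comp _ b2⟩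

-- getLastD of a nonempty list is a member
lemma pv_getLastD_mem {α : Type} (l : List α) (d : α) (h : l ≠ []) : l.getLastD d ∈ l := by
  rw [List.getLastD_eq_getLast?, List.getLast?_eq_some_getLast h, Option.getD_some]
  exact List.getLast_mem h

-- inserting into a key-sorted nonempty list: the last element becomes x iff the old last key ≤ key x
lemma pvInsertBy_lastD (x : String) (acc : List String) (d : String)
    (hp : acc.Pairwise (fun a b => pvKey a ≤ pvKey b)) (hne : acc ≠ []) :
    (PySem.List.insertBy (fun a b => decide (pvKey a < pvKey b)) x acc).getLastD d
      = if pvKey (acc.getLastD d) ≤ pvKey x then x else acc.getLastD d := by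
  induction acc generalizing d with
  | nil => cases hne rfl
  | cons a t ih =>
    cases t with
    | nil =>
      by_cases h : pvKey x < pvKey a
      · have hins : PySem.List.insertBy (fun a b => decide (pvKey a < pvKey b)) x [a]
            = [x, a] := by
          simp [PySem.List.insertBy, h]
        rw [hins]
        simp only [List.getLastD_cons, List.getLastD_nil]
        rw [if_neg (not_le.mpr h)]
      · have hins : PySem.List.insertBy (fun a b => decide (pvKey a < pvKey b)) x [a]
            = [a, x] := by
          simp [PySem.List.insertBy, h]
        rw [hins]
        simp only [List.getLastD_cons, List.getLastD_nil]
        rw [if_pos (not_lt.mp h)]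
    | cons b t' =>
      have hp' : (b :: t').Pairwise (fun a b => pvKey a ≤ pvKey b) := hp.of_cons
      have hhead : ∀ y ∈ b :: t', pvKey a ≤ pvKey y := (List.pairwise_cons.mp hp).1
      by_cases h : pvKey x < pvKey a
      · -- x goes to the front; the last element is unchanged and its key is > key x
        have hgt : pvKey x < pvKey ((b :: t').getLastD a) :=
          lt_of_lt_of_le h (hhead _ (pv_getLastD_mem _ a (by simp)))
        have hins : PySem.List.insertBy (fun a b => decide (pvKey a < pvKey b)) x (a :: b :: t')
            = x :: a :: b :: t' := by
          simp [PySem.List.insertBy, h]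
        rw [hins]
        simp only [List.getLastD_cons] at hgt ⊢
        rw [if_neg (not_le.mpr hgt)]
      · have hins : PySem.List.insertBy (fun a b => decide (pvKey a < pvKey b)) x (a :: b :: t')
            = a :: PySem.List.insertBy (fun a b => decide (pvKey a < pvKey b)) x (b :: t') := by
          simp [PySem.List.insertBy, h]
        rw [hins, List.getLastD_cons, ih a hp' (by simp)]
        simp only [List.getLastD_cons]

-- the last element of the stable sort of (init :: l) is the running max (ties to the later element)
lemma pvMain (init : String) (l : List String) :
    l.foldl pvStep (pvKey init, init)
      = (pvKey ((PySem.List.sorted (init :: l) (fun x => pvKey x)).getLastD init),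
         (PySem.List.sorted (init :: l) (fun x => pvKey x)).getLastD init) := by
  induction l using List.reverseRecOn with
  | nil =>
    simp [PySem.List.sorted_eq_foldl_insertBy, PySem.List.insertBy]
  | append_singleton l x ih =>
    have hsorted_snoc :
        PySem.List.sorted (init :: (l ++ [x])) (fun x => pvKey x)
          = PySem.List.insertBy (fun a b => decide (pvKey a < pvKey b)) x
              (PySem.List.sorted (init :: l) (fun x => pvKey x)) := by
      rw [PySem.List.sorted_eq_foldl_insertBy, PySem.List.sorted_eq_foldl_insertBy]
      rw [show init :: (l ++ [x]) = (init :: l) ++ [x] by simp]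
      rw [List.foldl_append]
      simp
    have hne : PySem.List.sorted (init :: l) (fun x => pvKey x) ≠ [] := by
      rw [ne_eq, PySem.List.sorted_eq_nil_iff]; simp
    have hp := PySem.List.sorted_pairwise (init :: l) (fun x => pvKey x)
    rw [List.foldl_append, List.foldl_cons, List.foldl_nil, ih, hsorted_snoc,
        pvInsertBy_lastD x _ init hp hne]
    unfold pvStep
    dsimp only
    split_ifs with h <;> rfl

lemma pvKey_empty : pvKey "" = "" := by decide

lemma pvGhcp_eq (l : List String) :
    get_higher_conf_pred ("" :: l) = (l.foldl pvStep ("", "")).2 := by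
  have h := pvMain "" l
  rw [pvKey_empty] at h
  have hne : PySem.List.sorted ("" :: l) (fun x => pvKey x) ≠ [] := by
    rw [ne_eq, PySem.List.sorted_eq_nil_iff]; simp
  unfold get_higher_conf_pred
  rw [PySem.List.pyGetD_neg_one _ _ hne, h]
  rw [List.getLastD_eq_getLast?, List.getLast?_eq_some_getLast hne]
  rfl

theorem pv_spec_aux (preds : List String) : get_3preds preds = get_3preds_alt preds := by
  unfold get_3preds get_3preds_alt
  rw [pvA_fold_split, pvB_fold_split]
  simp only [List.singleton_append]
  rw [pvGhcp_eq, pvGhcp_eq, pvGhcp_eq]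

-- ===== VERDICT (by name: the statement is the Claim_ definition above) =====
theorem get_3preds_spec : Claim_equal_get_3preds := by
  intro preds _ _
  unfold Spec_get_3preds
  exact pv_spec_aux preds
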